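-- pv_equiv track=rewrite | github.com/mldlproject/2022-i4mC-GRU | process_data/utils.py | cut_pos_seqs
-- ===== SOURCE A (Python) =====
-- def cut_pos_seqs(list_pos_seq, pos_idx):
--     pos_labels = []
--     pos_seq    = []
--     neg_seq    = []
--     neg_labels = []
--     for pos_ex in list_pos_seq:
--         for idx in range(17, len(pos_ex)-17):
--             if pos_ex[idx] == 'C' and idx == pos_idx:
--                 pos_seq.append(pos_ex[idx-17: idx+1+17])
--                 pos_labels.append(1)
--             if pos_ex[idx] == 'C' and idx != pos_idx:
--                 neg_seq.append(pos_ex[idx-17: idx+1+17])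
--                 neg_labels.append(0)
--     list_sequence = pos_seq + neg_seq
--     labels        = pos_labels + neg_labels
--     return list_sequence, labels
-- ===== SOURCE B (Python) =====
-- def cut_pos_seqs(list_pos_seq, pos_idx):
--     # First pass: the positive window per sequence by a direct index check (no inner scan).
--     pos_seq = []
--     for seq in list_pos_seq:
--         if 17 <= pos_idx < len(seq) - 17 and seq[pos_idx] == 'C':
--             pos_seq.append(seq[pos_idx - 17: pos_idx + 18])
--     # Second pass: all negative windows.
--     neg_seq = []
--     for seq in list_pos_seq:
--         for idx in range(17, len(seq) - 17):
--             if idx != pos_idx and seq[idx] == 'C':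
--                 neg_seq.append(seq[idx - 17: idx + 18])
--     return pos_seq + neg_seq, [1] * len(pos_seq) + [0] * len(neg_seq)
-- ===== Notes on version B (the rewrite author's own statement) =====
-- stated objective: simpler
-- what changed: Two passes: positives are found by a direct O(1) index check per sequence (17 <= pos_idx < len-17 and seq[pos_idx]=='C') instead of scanning every index for idx == pos_idx, negatives by a separate scan; labels are built as [1]*len + [0]*len instead of incremental appends.
import Mathlib
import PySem

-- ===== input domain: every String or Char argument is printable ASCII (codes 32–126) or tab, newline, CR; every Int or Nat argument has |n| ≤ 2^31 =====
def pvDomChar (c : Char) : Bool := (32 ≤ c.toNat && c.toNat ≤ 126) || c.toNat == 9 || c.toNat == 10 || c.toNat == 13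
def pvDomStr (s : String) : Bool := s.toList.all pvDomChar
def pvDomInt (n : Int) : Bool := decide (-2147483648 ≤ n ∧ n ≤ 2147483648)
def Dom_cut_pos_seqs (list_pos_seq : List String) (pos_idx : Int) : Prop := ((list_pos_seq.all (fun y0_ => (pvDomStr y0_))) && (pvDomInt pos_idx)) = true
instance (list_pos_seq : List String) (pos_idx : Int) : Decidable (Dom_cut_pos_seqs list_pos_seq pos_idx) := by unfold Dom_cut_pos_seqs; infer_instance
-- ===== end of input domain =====

-- B finds each sequence's positive window by a direct index check instead of scanning every
-- index for idx == pos_idx, collects negatives in a separate pass, and builds the label lists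
-- by replication; objective: simpler.


-- ===== PORT A =====
-- state = (pos_seq, pos_labels, neg_seq, neg_labels)
def cutAStep (pos_idx : Int) (pos_ex : String)
    (st : List String × List Int × List String × List Int) (idx : Int) :
    List String × List Int × List String × List Int :=
  let st1 :=
    if PySem.Str.pyGet? pos_ex idx = some 'C' ∧ idx = pos_idx then
      (st.1 ++ [PySem.Str.slice pos_ex (some (idx - 17)) (some (idx + 1 + 17))],
       st.2.1 ++ [(1 : Int)], st.2.2.1, st.2.2.2)
    else st
  if PySem.Str.pyGet? pos_ex idx = some 'C' ∧ idx ≠ pos_idx then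
    (st1.1, st1.2.1,
     st1.2.2.1 ++ [PySem.Str.slice pos_ex (some (idx - 17)) (some (idx + 1 + 17))],
     st1.2.2.2 ++ [(0 : Int)])
  else st1

def cut_pos_seqs (list_pos_seq : List String) (pos_idx : Int) : List String × List Int :=
  let st := list_pos_seq.foldl
    (fun st pos_ex =>
      (PySem.List.pyRange 17 (PySem.Str.len pos_ex - 17) 1).foldl (cutAStep pos_idx pos_ex) st)
    ([], [], [], [])
  (st.1 ++ st.2.2.1, st.2.1 ++ st.2.2.2)

-- ===== PORT B =====
def cut_pos_seqs_alt (list_pos_seq : List String) (pos_idx : Int) : List String × List Int :=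
  let pos_seq := list_pos_seq.foldl
    (fun acc seq =>
      if 17 ≤ pos_idx ∧ pos_idx < PySem.Str.len seq - 17 ∧ PySem.Str.pyGet? seq pos_idx = some 'C' then
        acc ++ [PySem.Str.slice seq (some (pos_idx - 17)) (some (pos_idx + 18))]
      else acc) []
  let neg_seq := list_pos_seq.foldl
    (fun acc seq =>
      (PySem.List.pyRange 17 (PySem.Str.len seq - 17) 1).foldl
        (fun acc idx =>
          if idx ≠ pos_idx ∧ PySem.Str.pyGet? seq idx = some 'C' then
            acc ++ [PySem.Str.slice seq (some (idx - 17)) (some (idx + 18))]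
          else acc) acc) []
  (pos_seq ++ neg_seq,
   List.replicate pos_seq.length (1 : Int) ++ List.replicate neg_seq.length (0 : Int))

-- ===== PRECONDITION & SPEC =====
def Spec_cut_pos_seqs (list_pos_seq : List String) (pos_idx : Int) (out : List String × List Int) : Prop := out = cut_pos_seqs_alt list_pos_seq pos_idx
instance (list_pos_seq : List String) (pos_idx : Int) (out : List String × List Int) : Decidable (Spec_cut_pos_seqs list_pos_seq pos_idx out) := by unfold Spec_cut_pos_seqs; infer_instance

-- ===== CLAIM (what is proved, stated in full; the proofs are below) =====
def Claim_equal_cut_pos_seqs : Prop := ∀ (list_pos_seq : List String) (pos_idx : Int), Dom_cut_pos_seqs list_pos_seq pos_idx → Spec_cut_pos_seqs list_pos_seq pos_idx (cut_pos_seqs list_pos_seq pos_idx)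

-- ===== LEMMAS AND PROOFS =====

-- the window A cuts (A writes idx+1+17, B writes idx+18; they are the same bound)
def pvWin (s : String) (i : Int) : String := PySem.Str.slice s (some (i - 17)) (some (i + 18))

def pvPosOf (pi : Int) (s : String) : List String :=
  ((PySem.List.pyRange 17 (PySem.Str.len s - 17) 1).filter
      (fun i => decide (PySem.Str.pyGet? s i = some 'C') && decide (i = pi))).map (pvWin s)

def pvNegOf (pi : Int) (s : String) : List String :=
  ((PySem.List.pyRange 17 (PySem.Str.len s - 17) 1).filter
      (fun i => decide (PySem.Str.pyGet? s i = some 'C') && !decide (i = pi))).map (pvWin s)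

lemma pvWin_A (s : String) (i : Int) :
    PySem.Str.slice s (some (i - 17)) (some (i + 1 + 17)) = pvWin s i := by
  unfold pvWin; norm_num [add_assoc]

lemma cons_replicate {α : Type} (n : Nat) (a : α) :
    a :: List.replicate n a = List.replicate n a ++ [a] := by
  rw [← List.replicate_succ, List.replicate_succ']

lemma innerA (pi : Int) (s : String) (l : List Int)
    (p n : List String) (pl nl : List Int) :
    l.foldl (cutAStep pi s) (p, pl, n, nl) =
      (p ++ (l.filter (fun i => decide (PySem.Str.pyGet? s i = some 'C') && decide (i = pi))).map (pvWin s),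
       pl ++ List.replicate ((l.filter (fun i => decide (PySem.Str.pyGet? s i = some 'C') && decide (i = pi))).length) (1 : Int),
       n ++ (l.filter (fun i => decide (PySem.Str.pyGet? s i = some 'C') && !decide (i = pi))).map (pvWin s),
       nl ++ List.replicate ((l.filter (fun i => decide (PySem.Str.pyGet? s i = some 'C') && !decide (i = pi))).length) (0 : Int)) := by
  induction l generalizing p pl n nl with
  | nil => simp
  | cons a l ih =>
    simp only [List.foldl_cons, cutAStep]
    by_cases hC : PySem.List.pyGet? s.toList a = some 'C'
    · by_cases he : a = pi
      · subst he
        simp [hC, ih, pvWin_A, cons_replicate]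
        exact List.replicate_succ'.symm
      · simp [hC, he, ih, pvWin_A, cons_replicate]
        exact List.replicate_succ'.symm
    · simp [hC, ih]

lemma outerA (pi : Int) (ls : List String) (p n : List String) (pl nl : List Int) :
    ls.foldl (fun st s => (PySem.List.pyRange 17 (PySem.Str.len s - 17) 1).foldl (cutAStep pi s) st)
        (p, pl, n, nl) =
      (p ++ ls.flatMap (pvPosOf pi),
       pl ++ List.replicate (ls.flatMap (pvPosOf pi)).length (1 : Int),
       n ++ ls.flatMap (pvNegOf pi),
       nl ++ List.replicate (ls.flatMap (pvNegOf pi)).length (0 : Int)) := by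
  induction ls generalizing p pl n nl with
  | nil => simp
  | cons s ls ih =>
    simp only [List.foldl_cons, innerA, ih, List.flatMap_cons]
    refine Prod.ext ?_ (Prod.ext ?_ (Prod.ext ?_ ?_)) <;>
      simp [pvPosOf, pvNegOf, List.append_assoc, List.length_append]

-- the positive filter over the index range is a direct check at pos_idx
lemma filter_eq_of_nodup (pi : Int) (q : Int → Bool) (l : List Int) (hl : l.Nodup) :
    l.filter (fun i => q i && decide (i = pi)) = if pi ∈ l ∧ q pi = true then [pi] else [] := by
  induction l with
  | nil => simp
  | cons a l ih =>
    rcases List.nodup_cons.mp hl with ⟨ha, hl'⟩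
    by_cases he : a = pi
    · subst he
      cases hq : q a <;> simp [hq, ih hl', ha]
    · cases hq : q a <;>
        simp [hq, he, ih hl', Ne.symm he]

lemma posOf_eq (pi : Int) (s : String) :
    pvPosOf pi s =
      (if 17 ≤ pi ∧ pi < PySem.Str.len s - 17 ∧ PySem.Str.pyGet? s pi = some 'C' then
        [pvWin s pi] else []) := by
  unfold pvPosOf
  have h := filter_eq_of_nodup pi (fun i => decide (PySem.Str.pyGet? s i = some 'C'))
      (PySem.List.pyRange 17 (PySem.Str.len s - 17) 1)
      (PySem.List.nodup_pyRange_one 17 (PySem.Str.len s - 17))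
  rw [h]
  simp only [PySem.List.mem_pyRange_one]
  split_ifs with h1 h2 <;> simp_all

lemma Bpos (pi : Int) (ls : List String) (acc : List String) :
    ls.foldl (fun acc seq =>
        if 17 ≤ pi ∧ pi < PySem.Str.len seq - 17 ∧ PySem.Str.pyGet? seq pi = some 'C' then
          acc ++ [PySem.Str.slice seq (some (pi - 17)) (some (pi + 18))]
        else acc) acc = acc ++ ls.flatMap (pvPosOf pi) := by
  induction ls generalizing acc with
  | nil => simp
  | cons s ls ih =>
    simp only [List.foldl_cons, ih, List.flatMap_cons, posOf_eq]
    split_ifs <;> simp [pvWin]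

lemma Bneg_inner (pi : Int) (s : String) (l : List Int) (acc : List String) :
    l.foldl (fun acc idx =>
        if idx ≠ pi ∧ PySem.Str.pyGet? s idx = some 'C' then
          acc ++ [PySem.Str.slice s (some (idx - 17)) (some (idx + 18))]
        else acc) acc =
      acc ++ (l.filter (fun i => decide (PySem.Str.pyGet? s i = some 'C') && !decide (i = pi))).map (pvWin s) := by
  induction l generalizing acc with
  | nil => simp
  | cons a l ih =>
    simp only [List.foldl_cons, ih, List.filter_cons]
    by_cases h1 : a = pi <;> by_cases h2 : PySem.List.pyGet? s.toList a = some 'C' <;>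
      simp [h1, h2, pvWin]

lemma Bneg (pi : Int) (ls : List String) (acc : List String) :
    ls.foldl (fun acc seq =>
        (PySem.List.pyRange 17 (PySem.Str.len seq - 17) 1).foldl
          (fun acc idx =>
            if idx ≠ pi ∧ PySem.Str.pyGet? seq idx = some 'C' then
              acc ++ [PySem.Str.slice seq (some (idx - 17)) (some (idx + 18))]
            else acc) acc) acc = acc ++ ls.flatMap (pvNegOf pi) := by
  induction ls generalizing acc with
  | nil => simp
  | cons s ls ih =>
    rw [List.foldl_cons, Bneg_inner, ih]
    simp [pvNegOf, List.append_assoc]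

-- ===== VERDICT (by name: the statement is the Claim_ definition above) =====
theorem cut_pos_seqs_spec : Claim_equal_cut_pos_seqs := by
  intro ls pi _
  unfold Spec_cut_pos_seqs cut_pos_seqs cut_pos_seqs_alt
  simp only [outerA, Bpos, Bneg, List.nil_append]
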